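-- pv_equiv track=rewrite | github.com/marcoeferro/eda_online_retail_sales | transformer/review_table.py | split_into_8_parts
-- ===== SOURCE A (Python) =====
-- def split_into_8_parts(review_text):
--     parts = review_text.split(',')
--     final_parts = []
--     temp = []
--
--     # Procesar cada parte para agruparlas hasta obtener 8 elementos finales
--     for part in parts:
--         temp.append(part.strip())  # Agregar a un temporal
--
--         # Si llegamos a tener 7 elementos en final_parts o si es el último elemento, unimos el resto
--         if len(final_parts) < 7:
--             final_parts.append(', '.join(temp))
--             temp = []
--         elif len(final_parts) == 7:  # Para el último grupo, unimos todo lo que quede en temp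
--             final_parts.append(', '.join(temp + parts[parts.index(part)+1:]))
--             break
--
--     # Retornar las 8 partes como una lista
--     return final_parts
-- ===== SOURCE B (Python) =====
-- def split_into_8_parts(review_text):
--     parts = review_text.split(',')
--     stripped = [p.strip() for p in parts]
--     if len(parts) <= 8:
--         return stripped
--     return stripped[:7] + [', '.join([stripped[7]] + parts[8:])]
-- ===== Notes on version B (the rewrite author's own statement) =====
-- stated objective: simpler
-- what changed: Replaces the stateful accumulate/reset/break loop with strip-all-fields upfront plus slicing: return the stripped list when there are at most 8 fields, else the first 7 stripped fields plus one join of the stripped 8th field with the raw tail from position 8; this also fixes A's parts.index duplicate-field bug.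
-- intended difference: On inputs whose comma-split has at least 8 fields and whose 8th field equals one of the first 7, A's parts.index finds the earlier duplicate, so A's 8th element re-joins fields from right after that earlier position (repeating fields already emitted); B joins exactly the fields from position 8 on, which is the intended 8-way grouping. — e.g. on split_into_8_parts("a,b,c,d,e,f,g,a"): A returns ["a", "b", "c", "d", "e", "f", "g", "a, b, c, d, e, f, g, a"], B returns ["a", "b", "c", "d", "e", "f", "g", "a"]
import Mathlib
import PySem

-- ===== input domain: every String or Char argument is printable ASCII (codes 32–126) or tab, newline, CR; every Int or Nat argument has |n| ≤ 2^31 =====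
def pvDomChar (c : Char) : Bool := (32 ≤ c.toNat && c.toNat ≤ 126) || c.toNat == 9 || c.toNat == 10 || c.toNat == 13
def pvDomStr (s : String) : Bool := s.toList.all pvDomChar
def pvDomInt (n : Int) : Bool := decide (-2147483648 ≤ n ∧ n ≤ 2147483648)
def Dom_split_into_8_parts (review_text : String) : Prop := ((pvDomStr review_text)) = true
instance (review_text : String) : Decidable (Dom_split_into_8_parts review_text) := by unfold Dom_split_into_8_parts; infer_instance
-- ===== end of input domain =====

-- B strips all fields upfront and uses slicing + one join of the tail instead of A's
-- stateful accumulate/reset/break loop; on duplicate 8th fields it returns the intended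
-- grouping where A's parts.index re-joins already-emitted fields (see D_ below).


-- ===== PORT A =====
-- the for-loop of A, with state (final_parts, temp) and early return on the break
def pvALoop (parts : List String) : List String → List String → List String → List String
  | [], final, _temp => final
  | part :: rest, final, temp =>
    let temp' := temp ++ [PySem.Str.strip part]          -- temp.append(part.strip())
    if final.length < 7 then
      pvALoop parts rest (final ++ [PySem.Str.join ", " temp']) []
    else if final.length = 7 then
      -- final_parts.append(', '.join(temp + parts[parts.index(part)+1:])); break
      final ++ [PySem.Str.join ", "
        (temp' ++ PySem.List.slice parts
          (some ((((PySem.List.index? parts part).getD 0 : ℕ) : Int) + 1)) none)]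
    else
      pvALoop parts rest final temp'

def split_into_8_parts (review_text : String) : List String :=
  pvALoop ((PySem.Str.split? review_text ",").getD [])
          ((PySem.Str.split? review_text ",").getD []) [] []

-- ===== PORT B =====
def split_into_8_parts_alt (review_text : String) : List String :=
  let parts := (PySem.Str.split? review_text ",").getD []
  let stripped := parts.map PySem.Str.strip
  if parts.length ≤ 8 then stripped
  else PySem.List.slice stripped none (some 7) ++
       [PySem.Str.join ", " (PySem.List.pyGetD stripped 7 "" :: PySem.List.slice parts (some 8) none)]

-- ===== PRECONDITION & SPEC =====
-- On inputs whose comma-separated field list has at least 8 fields and whose 8th field is a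
-- duplicate of one of the first 7, A's parts.index finds the earlier duplicate, so A's 8th
-- element re-joins fields from right after that earlier position (repeating fields already
-- emitted); B joins exactly the fields from position 8 on, which is the intended 8-way grouping.
-- (D_ is a shape condition on the input's comma-separated fields, stated on the raw character
-- list; it computes neither program's output.)
def D_split_into_8_parts (review_text : String) : Prop :=
  let fields := PySem.Chars.splitOn review_text.toList [',']
  8 ≤ fields.length ∧ fields.getD 7 [] ∈ fields.take 7
instance (review_text : String) : Decidable (D_split_into_8_parts review_text) := by
  unfold D_split_into_8_parts; infer_instance

def Spec_split_into_8_parts (review_text : String) (out : List String) : Prop :=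
  ¬ D_split_into_8_parts review_text → out = split_into_8_parts_alt review_text
instance (review_text : String) (out : List String) : Decidable (Spec_split_into_8_parts review_text out) := by unfold Spec_split_into_8_parts; infer_instance

def pvDiffWitness_split_into_8_parts : String := "a,b,c,d,e,f,g,a"
def pvDiffWitnessOut_split_into_8_parts : (List String) × (List String) :=
  (["a", "b", "c", "d", "e", "f", "g", "a, b, c, d, e, f, g, a"],
   ["a", "b", "c", "d", "e", "f", "g", "a"])

-- ===== CLAIM (what is proved, stated in full; the proofs are below) =====
def Claim_unchanged_split_into_8_parts : Prop := ∀ (review_text : String), Dom_split_into_8_parts review_text → Spec_split_into_8_parts review_text (split_into_8_parts review_text)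
def Claim_changed_split_into_8_parts : Prop := Dom_split_into_8_parts (pvDiffWitness_split_into_8_parts) ∧ D_split_into_8_parts (pvDiffWitness_split_into_8_parts) ∧ split_into_8_parts (pvDiffWitness_split_into_8_parts) = pvDiffWitnessOut_split_into_8_parts.1 ∧ split_into_8_parts_alt (pvDiffWitness_split_into_8_parts) = pvDiffWitnessOut_split_into_8_parts.2 ∧ pvDiffWitnessOut_split_into_8_parts.1 ≠ pvDiffWitnessOut_split_into_8_parts.2
def Claim_exact_split_into_8_parts : Prop := ∀ (review_text : String), Dom_split_into_8_parts review_text → D_split_into_8_parts review_text → split_into_8_parts review_text ≠ split_into_8_parts_alt review_text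

-- ===== LEMMAS AND PROOFS =====

-- D_ (stated on the input's raw character fields) read through the split both ports perform
lemma pv_parts_eq (s : String) :
    (PySem.Str.split? s ",").getD [] = (PySem.Chars.splitOn s.toList [',']).map String.ofList := by
  simp [PySem.Str.split?, PySem.Chars.split?]

lemma pv_D_iff (s : String) :
    D_split_into_8_parts s ↔
      (8 ≤ ((PySem.Str.split? s ",").getD []).length ∧
       ((PySem.Str.split? s ",").getD []).getD 7 "" ∈ ((PySem.Str.split? s ",").getD []).take 7) := by
  unfold D_split_into_8_parts
  rw [pv_parts_eq]
  set fields := PySem.Chars.splitOn s.toList [','] with hf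
  constructor
  · rintro ⟨h1, h2⟩
    refine ⟨by simpa using h1, ?_⟩
    have h7 : 7 < fields.length := by omega
    rw [List.getD_eq_getElem _ _ h7] at h2
    rw [List.getD_eq_getElem _ _ (by simpa using h7), ← List.map_take]
    rw [List.getElem_map]
    exact List.mem_map_of_mem h2
  · rintro ⟨h1, h2⟩
    have h1' : 8 ≤ fields.length := by simpa using h1
    refine ⟨h1', ?_⟩
    have h7 : 7 < fields.length := by omega
    rw [List.getD_eq_getElem _ _ (by simpa using h7), ← List.map_take, List.getElem_map] at h2
    obtain ⟨y, hy, hxy⟩ := List.mem_map.mp h2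
    have : y = fields[7] := by
      have := congrArg String.toList hxy
      simpa using this
    rw [List.getD_eq_getElem _ _ h7]
    exact this ▸ hy

lemma pv_join_one (x : String) : PySem.Str.join ", " [x] = x := by
  have h : (PySem.Str.join ", " [x]).toList = x.toList := by
    rw [PySem.Str.toList_join]
    simp [PySem.Chars.join_singleton]
  exact String.toList_inj.mp h

-- while final_parts has room and temp is empty, each field just gets stripped and appended
lemma pvALoop_small (parts : List String) : ∀ (rem final : List String),
    final.length + rem.length ≤ 7 →
    pvALoop parts rem final [] = final ++ rem.map PySem.Str.strip := by
  intro rem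
  induction rem with
  | nil => intro final h; simp [pvALoop]
  | cons p rest ih =>
    intro final h
    simp only [List.length_cons] at h
    simp only [pvALoop]
    rw [if_pos (show final.length < 7 by omega)]
    rw [ih _ (by simp only [List.length_append, List.length_cons, List.length_nil]; omega)]
    simp [pv_join_one]

-- reaching the 8th field (7 elements already emitted), A breaks with the index?-based join
lemma pvALoop_break (parts : List String) (p : String) (rest : List String) :
    ∀ (pre final : List String), final.length + pre.length = 7 →
    pvALoop parts (pre ++ p :: rest) final [] =
      final ++ pre.map PySem.Str.strip ++
        [PySem.Str.join ", " (PySem.Str.strip p ::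
          PySem.List.slice parts
            (some ((((PySem.List.index? parts p).getD 0 : ℕ) : Int) + 1)) none)] := by
  intro pre
  induction pre with
  | nil =>
    intro final h
    simp only [List.length_nil] at h
    simp only [List.nil_append, pvALoop]
    rw [if_neg (by omega), if_pos (by omega)]
    simp
  | cons q pre ih =>
    intro final h
    simp only [List.length_cons] at h
    simp only [List.cons_append, pvALoop]
    rw [if_pos (show final.length < 7 by omega)]
    rw [ih _ (by simp only [List.length_append, List.length_cons, List.length_nil]; omega)]
    simp [pv_join_one, List.append_assoc]

lemma pv_parts_decomp (parts : List String) (h8 : 8 ≤ parts.length) :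
    parts = parts.take 7 ++ parts.getD 7 "" :: parts.drop 8 := by
  have h7 : 7 < parts.length := by omega
  have hd : parts.drop 7 = parts[7] :: parts.drop 8 := List.drop_eq_getElem_cons h7
  rw [List.getD_eq_getElem _ _ h7, ← hd]
  exact (List.take_append_drop 7 parts).symm

lemma pvMain (parts : List String)
    (hD : ¬ (8 ≤ parts.length ∧ parts.getD 7 "" ∈ parts.take 7)) :
    pvALoop parts parts [] [] =
      (if parts.length ≤ 8 then parts.map PySem.Str.strip
       else PySem.List.slice (parts.map PySem.Str.strip) none (some 7) ++
            [PySem.Str.join ", " (PySem.List.pyGetD (parts.map PySem.Str.strip) 7 "" ::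
              PySem.List.slice parts (some 8) none)]) := by
  by_cases hle : parts.length ≤ 7
  · rw [pvALoop_small parts parts [] (by simpa using hle)]
    rw [if_pos (by omega)]
    simp
  · have h8 : 8 ≤ parts.length := by omega
    have h7 : 7 < parts.length := by omega
    have hdec := pv_parts_decomp parts h8
    have hnm : parts.getD 7 "" ∉ parts.take 7 := fun hm => hD ⟨h8, hm⟩
    have hidx : PySem.List.index? parts (parts.getD 7 "") = some 7 := by
      rw [PySem.List.index?_eq_some_iff]
      exact ⟨parts.take 7, parts.drop 8, hdec, by rw [List.length_take]; omega, hnm⟩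
    have hbreak := pvALoop_break parts (parts.getD 7 "") (parts.drop 8) (parts.take 7) []
      (by rw [List.length_nil, List.length_take]; omega)
    have hsl : PySem.List.slice parts (some ((((7:ℕ)):Int) + 1)) none = parts.drop 8 := by
      have he : ((((7:ℕ)):Int) + 1) = (((8:ℕ)):Int) := by norm_num
      rw [he, PySem.List.slice_from_natCast]
    have hstep : pvALoop parts parts [] [] =
        [] ++ (parts.take 7).map PySem.Str.strip ++
          [PySem.Str.join ", " (PySem.Str.strip (parts.getD 7 "") :: parts.drop 8)] := by
      rw [← hdec] at hbreak
      rw [hbreak, hidx]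
      simp only [Option.getD_some]
      rw [hsl]
    rw [hstep]
    have hget : PySem.List.pyGetD (parts.map PySem.Str.strip) 7 "" =
        PySem.Str.strip (parts.getD 7 "") := by
      have h7m : 7 < (parts.map PySem.Str.strip).length := by simpa using h7
      rw [show ((7:Int)) = (((7:ℕ)):Int) by norm_num, PySem.List.pyGetD_natCast]
      rw [List.getD_eq_getElem _ _ h7m, List.getD_eq_getElem _ _ h7]
      simp
    by_cases h9 : parts.length ≤ 8
    · rw [if_pos h9]
      have hdrop : parts.drop 8 = [] := by
        have : parts.length ≤ 8 := h9
        simp [List.drop_eq_nil_iff]; omega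
      rw [hdrop, pv_join_one]
      conv_rhs => rw [hdec, hdrop]
      simp
    · rw [if_neg h9]
      rw [hget]
      rw [PySem.List.slice_from parts (by norm_num : (0:Int) ≤ 8)]
      rw [PySem.List.slice_to (parts.map PySem.Str.strip) (by norm_num : (0:Int) ≤ 7)]
      simp [List.map_take]

-- join length arithmetic, used to show A's over-long 8th element differs from B's
lemma pv_chars_join_len (sep : List Char) : ∀ (l : List (List Char)),
    (PySem.Chars.join sep l).length = (l.map List.length).sum + sep.length * (l.length - 1) := by
  intro l
  induction l with
  | nil => simp [PySem.Chars.join_nil]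
  | cons x t ih =>
    cases t with
    | nil => simp [PySem.Chars.join_singleton]
    | cons y t' =>
      rw [PySem.Chars.join_cons_cons]
      simp only [List.length_append, List.map_cons, List.sum_cons, List.length_cons,
        Nat.add_sub_cancel] at ih ⊢
      rw [ih, Nat.mul_succ]
      omega

lemma pv_join_ne (x : String) (mid rest : List String) (hm : mid ≠ []) :
    PySem.Str.join ", " (x :: (mid ++ rest)) ≠ PySem.Str.join ", " (x :: rest) := by
  intro h
  have h2 : (PySem.Str.join ", " (x :: (mid ++ rest))).toList.length
      = (PySem.Str.join ", " (x :: rest)).toList.length := by rw [h]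
  rw [PySem.Str.toList_join, PySem.Str.toList_join,
    pv_chars_join_len, pv_chars_join_len] at h2
  have hsep : (", " : String).toList.length = 2 := by decide
  have hmpos : 0 < mid.length := by
    cases mid with
    | nil => exact absurd rfl hm
    | cons a b => simp
  simp only [List.map_cons, List.map_append, List.sum_cons, List.sum_append,
    List.length_cons, List.length_append, List.length_map, hsep,
    Nat.add_sub_cancel] at h2
  omega

lemma pvTight (parts : List String) (h8 : 8 ≤ parts.length)
    (hmem : parts.getD 7 "" ∈ parts.take 7) :
    pvALoop parts parts [] [] ≠
      (if parts.length ≤ 8 then parts.map PySem.Str.strip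
       else PySem.List.slice (parts.map PySem.Str.strip) none (some 7) ++
            [PySem.Str.join ", " (PySem.List.pyGetD (parts.map PySem.Str.strip) 7 "" ::
              PySem.List.slice parts (some 8) none)]) := by
  have h7 : 7 < parts.length := by omega
  have hdec := pv_parts_decomp parts h8
  have htl : (parts.take 7).length = 7 := by rw [List.length_take]; omega
  obtain ⟨i, hi⟩ := Option.isSome_iff_exists.mp
    ((PySem.List.index?_isSome_iff (parts.take 7) (parts.getD 7 "")).mpr hmem)
  have hilt : i < 7 := by
    obtain ⟨pre, suf, hps, hlen, -⟩ := (PySem.List.index?_eq_some_iff _ _ _).mp hi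
    have hL := congrArg List.length hps
    rw [htl] at hL
    simp only [List.length_append, List.length_cons] at hL
    omega
  have hidx : PySem.List.index? parts (parts.getD 7 "") = some i := by
    have ha := PySem.List.index?_append_of_mem (parts.drop 7) hmem
    rw [List.take_append_drop] at ha
    rw [ha, hi]
  have hbreak := pvALoop_break parts (parts.getD 7 "") (parts.drop 8) (parts.take 7) []
    (by rw [List.length_nil, List.length_take]; omega)
  rw [← hdec] at hbreak
  rw [hidx] at hbreak
  simp only [Option.getD_some] at hbreak
  have hsl : PySem.List.slice parts (some (((i:ℕ):Int) + 1)) none = parts.drop (i+1) := by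
    have he : (((i:ℕ):Int) + 1) = (((i+1:ℕ)):Int) := by push_cast; ring
    rw [he, PySem.List.slice_from_natCast]
  rw [hsl] at hbreak
  have hdd : List.drop (7-i) (List.drop (i+1) parts) = List.drop 8 parts := by
    rw [List.drop_drop]; congr 1; omega
  have hsplit : parts.drop (i+1) = List.take (7-i) (parts.drop (i+1)) ++ parts.drop 8 := by
    conv_lhs => rw [← List.take_append_drop (7-i) (parts.drop (i+1))]
    rw [hdd]
  have hmidne : List.take (7-i) (parts.drop (i+1)) ≠ [] := by
    intro hnil
    rw [List.take_eq_nil_iff] at hnil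
    rcases hnil with h0 | h0
    · omega
    · rw [List.drop_eq_nil_iff] at h0; omega
  by_cases h9 : parts.length ≤ 8
  · rw [if_pos h9]
    have hdrop8 : parts.drop 8 = [] := by rw [List.drop_eq_nil_iff]; omega
    intro heq
    rw [hbreak] at heq
    conv_rhs at heq => rw [hdec, hdrop8]
    simp only [List.map_append, List.map_cons, List.map_nil, List.nil_append] at heq
    have hj := List.append_cancel_left heq
    have hj2 : PySem.Str.join ", "
        (PySem.Str.strip (parts.getD 7 "") :: parts.drop (i+1))
        = PySem.Str.strip (parts.getD 7 "") := by
      injection hj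
    rw [hsplit, hdrop8] at hj2
    exact pv_join_ne _ _ [] hmidne (hj2.trans (pv_join_one _).symm)
  · rw [if_neg h9]
    rw [PySem.List.slice_from parts (by norm_num : (0:Int) ≤ 8)]
    rw [PySem.List.slice_to (parts.map PySem.Str.strip) (by norm_num : (0:Int) ≤ 7)]
    have hget : PySem.List.pyGetD (parts.map PySem.Str.strip) 7 "" =
        PySem.Str.strip (parts.getD 7 "") := by
      have h7m : 7 < (parts.map PySem.Str.strip).length := by simpa using h7
      rw [show ((7:Int)) = (((7:ℕ)):Int) by norm_num, PySem.List.pyGetD_natCast]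
      rw [List.getD_eq_getElem _ _ h7m, List.getD_eq_getElem _ _ h7]
      simp
    rw [hget]
    intro heq
    rw [hbreak] at heq
    have h8t : ((8:Int)).toNat = 8 := by decide
    have h7t : ((7:Int)).toNat = 7 := by decide
    simp only [h8t, h7t, List.nil_append, ← List.map_take] at heq
    have hj := List.append_cancel_left heq
    have hj2 : PySem.Str.join ", "
        (PySem.Str.strip (parts.getD 7 "") :: parts.drop (i+1))
        = PySem.Str.join ", "
        (PySem.Str.strip (parts.getD 7 "") :: parts.drop 8) := by
      injection hj
    rw [hsplit] at hj2
    exact pv_join_ne _ _ _ hmidne hj2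

-- ===== VERDICT (by name: the statement is the Claim_ definition above) =====
theorem split_into_8_parts_spec : Claim_unchanged_split_into_8_parts := by
  intro s _ hD
  exact pvMain _ (fun h => hD ((pv_D_iff s).mpr h))

theorem split_into_8_parts_changed : Claim_changed_split_into_8_parts := by
  unfold Claim_changed_split_into_8_parts; decide

theorem split_into_8_parts_tight : Claim_exact_split_into_8_parts := by
  intro s _ hDD
  obtain ⟨h1, h2⟩ := (pv_D_iff s).mp hDD
  exact pvTight _ h1 h2
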